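-- pv_equiv track=rewrite | github.com/alvinn6o/Agentic-AI-Retail | ui/utils/pdf_export.py | _action_plan_rows
-- ===== SOURCE A (Python) =====
-- from typing import Any
--
-- _UNICODE_SUBS: dict[str, str] = {
--     "\u2014": "--",
--     "\u2013": "-",
--     "\u2019": "'",
--     "\u2018": "'",
--     "\u201c": '"',
--     "\u201d": '"',
--     "\u2022": "-",
--     "\u2192": "->",
--     "\u2190": "<-",
--     "\u00a3": "GBP",
--     "\u2026": "...",
-- }
--
-- def _sanitize(text: str) -> str:
--     for char, replacement in _UNICODE_SUBS.items():
--         text = text.replace(char, replacement)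
--     return text.encode("latin-1", errors="replace").decode("latin-1")
--
-- def _safe(v: Any, default: str = "-") -> str:
--     if v is None:
--         return default
--     s = str(v).strip()
--     return _sanitize(s) if s else default
--
-- def _action_plan_rows(
--     actions: list[dict], tasks: list[dict]
-- ) -> list[dict[str, str]]:
--     """
--     Merge decision actions with worker tasks to produce a unified action-plan table.
--     Each action is matched to a worker task by action_type similarity.
--     """
--     # Build a quick lookup: action_type -> first matching worker task
--     task_map: dict[str, dict] = {}
--     for t in tasks:
--         key = t.get("action_type", "").lower()
--         if key and key not in task_map:
--             task_map[key] = t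
--
--     rows = []
--     for a in actions:
--         atype = a.get("action_type", "").lower()
--         matched = task_map.get(atype, {})
--         rows.append({
--             "action": _safe(a.get("description")),
--             "priority": _safe(a.get("urgency", "medium")).upper(),
--             "owner": _safe(matched.get("assigned_to") or "-"),
--             "due": _safe(matched.get("due_date") or "-"),
--             "impact": _safe(a.get("expected_impact") or matched.get("expected_outcome") or "-"),
--         })
--     return rows
-- ===== SOURCE B (Python) =====
-- from typing import Any
--
-- _UNICODE_SUBS: dict[str, str] = {
--     "\u2014": "--",
--     "\u2013": "-",
--     "\u2019": "'",
--     "\u2018": "'",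
--     "\u201c": '"',
--     "\u201d": '"',
--     "\u2022": "-",
--     "\u2192": "->",
--     "\u2190": "<-",
--     "\u00a3": "GBP",
--     "\u2026": "...",
-- }
--
-- def _sanitize(text: str) -> str:
--     for char, replacement in _UNICODE_SUBS.items():
--         text = text.replace(char, replacement)
--     return text.encode("latin-1", errors="replace").decode("latin-1")
--
-- def _safe(v: Any, default: str = "-") -> str:
--     if v is None:
--         return default
--     s = str(v).strip()
--     return _sanitize(s) if s else default
--
-- def _match(a: dict, tasks: list[dict]) -> dict:
--     """First worker task whose action_type matches a's (case-insensitive); {} if none."""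
--     atype = a.get("action_type", "").lower()
--     if atype:
--         for t in tasks:
--             if t.get("action_type", "").lower() == atype:
--                 return t
--     return {}
--
-- def _row(a: dict, matched: dict) -> dict[str, str]:
--     return {
--         "action": _safe(a.get("description")),
--         "priority": _safe(a.get("urgency", "medium")).upper(),
--         "owner": _safe(matched.get("assigned_to") or "-"),
--         "due": _safe(matched.get("due_date") or "-"),
--         "impact": _safe(a.get("expected_impact") or matched.get("expected_outcome") or "-"),
--     }
--
-- def _action_plan_rows(
--     actions: list[dict], tasks: list[dict]
-- ) -> list[dict[str, str]]:
--     """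
--     Merge decision actions with worker tasks to produce a unified action-plan table.
--     No precomputed index: each action scans tasks for its first match directly.
--     """
--     return [_row(a, _match(a, tasks)) for a in actions]
-- ===== Notes on version B (the rewrite author's own statement) =====
-- stated objective: alternative
-- what changed: Drops the precomputed action_type->task index dict entirely: B is a list comprehension that, per action, linearly scans tasks for the first case-insensitive action_type match (skipping the scan when the action's type is empty), with row construction factored into a helper.
import Mathlib
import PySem

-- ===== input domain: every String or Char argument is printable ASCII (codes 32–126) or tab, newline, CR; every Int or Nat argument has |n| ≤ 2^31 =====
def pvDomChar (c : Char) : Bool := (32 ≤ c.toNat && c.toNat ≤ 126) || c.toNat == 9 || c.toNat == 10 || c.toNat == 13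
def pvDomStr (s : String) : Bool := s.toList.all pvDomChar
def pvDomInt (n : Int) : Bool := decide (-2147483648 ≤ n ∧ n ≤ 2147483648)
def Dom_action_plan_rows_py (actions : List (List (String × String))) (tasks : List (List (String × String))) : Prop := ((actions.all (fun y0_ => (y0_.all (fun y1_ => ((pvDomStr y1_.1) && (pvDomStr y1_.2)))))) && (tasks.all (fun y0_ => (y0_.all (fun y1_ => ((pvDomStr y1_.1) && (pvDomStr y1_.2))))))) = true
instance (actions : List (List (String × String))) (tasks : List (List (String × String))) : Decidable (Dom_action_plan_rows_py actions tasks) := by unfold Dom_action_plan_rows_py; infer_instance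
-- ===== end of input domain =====

-- B replaces A's precomputed action_type -> task index with a per-action linear scan of tasks
-- (objective: alternative decomposition, same results). Return-value equivalence only; neither mutates.

-- ===== SHARED HELPERS (both Pythons define the same _sanitize/_safe) =====
-- _sanitize: the _UNICODE_SUBS replace chain, then latin-1 encode with errors="replace" and decode:
-- codepoints ≤ 255 are kept, larger ones become '?' — exact Python semantics (latin-1 is identity on 0..255).
def pvSanitize (s : String) : String :=
  let s := PySem.Str.replace s "\u2014" "--"
  let s := PySem.Str.replace s "\u2013" "-"
  let s := PySem.Str.replace s "\u2019" "'"
  let s := PySem.Str.replace s "\u2018" "'"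
  let s := PySem.Str.replace s "\u201c" "\""
  let s := PySem.Str.replace s "\u201d" "\""
  let s := PySem.Str.replace s "\u2022" "-"
  let s := PySem.Str.replace s "\u2192" "->"
  let s := PySem.Str.replace s "\u2190" "<-"
  let s := PySem.Str.replace s "\u00a3" "GBP"
  let s := PySem.Str.replace s "\u2026" "..."
  String.ofList (s.toList.map (fun c => if c.toNat ≤ 255 then c else '?'))

-- _safe(v) with the default "-" used at every call site (v is None or a str here)
def pvSafe (v : Option String) : String :=
  match v with
  | none => "-"
  | some s0 =>
    let s := PySem.Str.strip s0
    if s = "" then "-" else pvSanitize s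

-- d.get(k) on a Python dict passed as an association list
def pvGet (d : List (String × String)) (k : String) : Option String :=
  (PySem.Dict.mk d).get? k

-- Python `o or y` where o is d.get(k) (None) or a str; "" is falsy
def pvOrStr (o : Option String) (y : String) : String :=
  match o with
  | none => y
  | some s => if s = "" then y else s

-- x.get("action_type", "").lower() — used by both sources
def pvTaskKey (t : List (String × String)) : String :=
  PySem.Str.lower ((PySem.Dict.mk t).getD "action_type" "")

-- ===== PORT A =====
-- the loop body building task_map: `if key and key not in task_map: task_map[key] = t`
def pvStep (m : PySem.Dict String (List (String × String))) (t : List (String × String)) : PySem.Dict String (List (String × String)) :=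
  let key := pvTaskKey t
  if key ≠ "" ∧ m.contains key = false then m.insert key t else m

-- the loop body of `for a in actions: rows.append({...})`
def pvAccRow (task_map : PySem.Dict String (List (String × String))) (rows : List (List (String × String))) (a : List (String × String)) : List (List (String × String)) :=
  let atype := pvTaskKey a
  let matched := task_map.getD atype []
  rows ++ [[("action", pvSafe (pvGet a "description")),
            ("priority", PySem.Str.upper (pvSafe (some ((PySem.Dict.mk a).getD "urgency" "medium")))),
            ("owner", pvSafe (some (pvOrStr (pvGet matched "assigned_to") "-"))),
            ("due", pvSafe (some (pvOrStr (pvGet matched "due_date") "-"))),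
            ("impact", pvSafe (some (pvOrStr (pvGet a "expected_impact") (pvOrStr (pvGet matched "expected_outcome") "-"))))]]

def action_plan_rows_py (actions : List (List (String × String))) (tasks : List (List (String × String))) : List (List (String × String)) :=
  let task_map : PySem.Dict String (List (String × String)) := tasks.foldl pvStep PySem.Dict.empty
  actions.foldl (pvAccRow task_map) []

-- ===== PORT B =====
-- the scan inside _match: first task whose action_type (lowercased) equals atype, else {}
def pvFindTask (tasks : List (List (String × String))) (atype : String) : List (String × String) :=
  match tasks with
  | [] => []
  | t :: rest => if pvTaskKey t = atype then t else pvFindTask rest atype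

def pvMatch (a : List (String × String)) (tasks : List (List (String × String))) : List (String × String) :=
  let atype := pvTaskKey a
  if atype ≠ "" then pvFindTask tasks atype else []

def pvRow (a : List (String × String)) (matched : List (String × String)) : List (String × String) :=
  [("action", pvSafe (pvGet a "description")),
   ("priority", PySem.Str.upper (pvSafe (some ((PySem.Dict.mk a).getD "urgency" "medium")))),
   ("owner", pvSafe (some (pvOrStr (pvGet matched "assigned_to") "-"))),
   ("due", pvSafe (some (pvOrStr (pvGet matched "due_date") "-"))),
   ("impact", pvSafe (some (pvOrStr (pvGet a "expected_impact") (pvOrStr (pvGet matched "expected_outcome") "-"))))]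

def action_plan_rows_py_alt (actions : List (List (String × String))) (tasks : List (List (String × String))) : List (List (String × String)) :=
  actions.map (fun a => pvRow a (pvMatch a tasks))

-- ===== PRECONDITION & SPEC =====
def Spec_action_plan_rows_py (actions : List (List (String × String))) (tasks : List (List (String × String))) (out : List (List (String × String))) : Prop := out = action_plan_rows_py_alt actions tasks
instance (actions : List (List (String × String))) (tasks : List (List (String × String))) (out : List (List (String × String))) : Decidable (Spec_action_plan_rows_py actions tasks out) := by unfold Spec_action_plan_rows_py; infer_instance

-- ===== CLAIM (what is proved, stated in full; the proofs are below) =====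
def Claim_equal_action_plan_rows_py : Prop := ∀ (actions : List (List (String × String))) (tasks : List (List (String × String))), Dom_action_plan_rows_py actions tasks → Spec_action_plan_rows_py actions tasks (action_plan_rows_py actions tasks)

-- ===== LEMMAS AND PROOFS =====

lemma pvStep_eq (m : PySem.Dict String (List (String × String))) (t : List (String × String)) :
    pvStep m t = if pvTaskKey t ≠ "" ∧ m.contains (pvTaskKey t) = false then m.insert (pvTaskKey t) t else m := rfl

-- once k is present, the fold never changes its value
lemma pvFold_present (tasks : List (List (String × String))) (m : PySem.Dict String (List (String × String))) (k : String)
    (h : m.contains k = true) :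
    (tasks.foldl pvStep m).getD k [] = m.getD k [] := by
  induction tasks generalizing m with
  | nil => rfl
  | cons t rest ih =>
    rw [List.foldl_cons, pvStep_eq]
    split_ifs with hc
    · have hk : k ≠ pvTaskKey t := by
        intro e; rw [e] at h; rw [h] at hc; exact absurd hc.2 (by simp)
      rw [ih _ (by simp [PySem.Dict.contains_insert, h])]
      rw [PySem.Dict.getD_insert]
      simp [hk]
    · exact ih _ h

-- while k (≠ "") is absent, A's indexed lookup matches B's first-match scan
lemma pvFold_absent (tasks : List (List (String × String))) (m : PySem.Dict String (List (String × String))) (k : String)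
    (hk : k ≠ "") (h : m.contains k = false) :
    (tasks.foldl pvStep m).getD k [] = pvFindTask tasks k := by
  induction tasks generalizing m with
  | nil =>
    rw [List.foldl_nil, pvFindTask]
    exact PySem.Dict.getD_of_not_contains m [] h
  | cons t rest ih =>
    rw [List.foldl_cons, pvStep_eq, pvFindTask]
    by_cases he : pvTaskKey t = k
    · rw [he, if_pos ⟨hk, h⟩, if_pos rfl]
      rw [pvFold_present rest _ k (by simp)]
      rw [PySem.Dict.getD_insert]; simp
    · rw [if_neg he]
      split_ifs with hc
      · exact ih _ (by simp [PySem.Dict.contains_insert, h, Ne.symm he])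
      · exact ih _ h

-- the fold never stores the empty key
lemma pvFold_empty_key (tasks : List (List (String × String))) (m : PySem.Dict String (List (String × String)))
    (h : m.contains "" = false) :
    (tasks.foldl pvStep m).getD "" [] = [] := by
  induction tasks generalizing m with
  | nil =>
    rw [List.foldl_nil]
    exact PySem.Dict.getD_of_not_contains m [] h
  | cons t rest ih =>
    rw [List.foldl_cons, pvStep_eq]
    split_ifs with hc
    · exact ih _ (by simp [PySem.Dict.contains_insert, h, Ne.symm hc.1])
    · exact ih _ h

-- A's matched dict equals B's pvMatch
lemma pvMatched_eq (tasks : List (List (String × String))) (a : List (String × String)) :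
    (tasks.foldl pvStep PySem.Dict.empty).getD (pvTaskKey a) [] = pvMatch a tasks := by
  unfold pvMatch
  by_cases hk : pvTaskKey a = ""
  · rw [hk, if_neg (by simp)]
    exact pvFold_empty_key tasks _ (PySem.Dict.contains_empty "")
  · rw [if_pos hk]
    exact pvFold_absent tasks _ _ hk (PySem.Dict.contains_empty _)

-- A's append-accumulator row loop is a map over actions
lemma pvAcc_eq (actions : List (List (String × String))) (tm : PySem.Dict String (List (String × String)))
    (acc : List (List (String × String))) :
    actions.foldl (pvAccRow tm) acc = acc ++ actions.map (fun a => pvRow a (tm.getD (pvTaskKey a) [])) := by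
  induction actions generalizing acc with
  | nil => simp
  | cons x xs ih =>
    rw [List.foldl_cons, ih]
    show (pvAccRow tm acc x) ++ _ = _
    simp [pvAccRow, pvRow]

-- ===== VERDICT (by name: the statement is the Claim_ definition above) =====
theorem action_plan_rows_py_spec : Claim_equal_action_plan_rows_py := by
  intro actions tasks _
  unfold Spec_action_plan_rows_py action_plan_rows_py action_plan_rows_py_alt
  rw [pvAcc_eq]
  simp only [List.nil_append]
  exact List.map_congr_left (fun a _ => by rw [pvMatched_eq tasks a])
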